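-- pv_equiv track=rewrite | github.com/heyifan142857/SubBake | subbake/pipeline.py | _pop_best_effort_translation
-- ===== SOURCE A (Python) =====
-- def _pop_best_effort_translation(
--
--     candidates: list[tuple[str | None, str]],
--     used_indexes: set[int],
--     source_id: str,
-- ) -> str:
--     for index, (candidate_id, translation) in enumerate(candidates):
--         if index in used_indexes or candidate_id != source_id:
--             continue
--         used_indexes.add(index)
--         return translation
--     for index, (_, translation) in enumerate(candidates):
--         if index in used_indexes:
--             continue
--         used_indexes.add(index)
--         return translation
--     return ""
-- ===== SOURCE B (Python) =====
-- def _pop_best_effort_translation(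
--     candidates: "list[tuple[str | None, str]]",
--     used_indexes: "set[int]",
--     source_id: str,
-- ) -> str:
--     # Single pass: remember the first unused matching index and the first
--     # unused index overall, decide afterwards.
--     match_found = fallback_found = None
--     for index, (candidate_id, translation) in enumerate(candidates):
--         if index in used_indexes:
--             continue
--         if match_found is None and candidate_id == source_id:
--             match_found = (index, translation)
--         if fallback_found is None:
--             fallback_found = (index, translation)
--     if match_found is not None:
--         used_indexes.add(match_found[0])
--         return match_found[1]
--     if fallback_found is not None:
--         used_indexes.add(fallback_found[0])
--         return fallback_found[1]
--     return ""
-- ===== Notes on version B (the rewrite author's own statement) =====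
-- stated objective: simpler
-- what changed: Replaces A's two sequential enumerate scans by a single pass that tracks the first unused matching candidate and the first unused candidate overall, with one post-loop decision.
import Mathlib
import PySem

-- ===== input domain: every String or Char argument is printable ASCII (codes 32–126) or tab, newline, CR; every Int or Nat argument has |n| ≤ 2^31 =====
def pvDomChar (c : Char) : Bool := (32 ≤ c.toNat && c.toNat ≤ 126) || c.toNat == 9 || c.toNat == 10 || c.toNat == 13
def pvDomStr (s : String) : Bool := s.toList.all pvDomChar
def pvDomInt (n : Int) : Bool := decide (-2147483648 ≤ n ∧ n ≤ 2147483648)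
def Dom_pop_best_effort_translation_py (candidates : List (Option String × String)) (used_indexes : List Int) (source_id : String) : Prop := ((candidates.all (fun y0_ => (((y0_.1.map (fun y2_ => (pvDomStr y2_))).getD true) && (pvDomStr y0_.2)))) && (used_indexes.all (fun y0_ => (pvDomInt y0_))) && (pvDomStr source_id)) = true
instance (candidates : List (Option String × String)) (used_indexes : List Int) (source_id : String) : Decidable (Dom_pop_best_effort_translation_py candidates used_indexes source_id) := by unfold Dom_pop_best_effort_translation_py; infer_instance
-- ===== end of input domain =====

-- B replaces A's two sequential scans by one pass tracking the first unused match and the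
-- first unused candidate (objective: simpler). Both Pythons also add the returned index to
-- used_indexes (same index in A and B); the equivalence proved here is about the return value.


-- ===== PORT A =====
-- first loop of A: first index not in used_indexes whose candidate_id == source_id
def pvFindMatchA (cs : List (Option String × String)) (i : Int) (used : List Int) (sid : String) : Option String :=
  match cs with
  | [] => none
  | (cid, tr) :: rest =>
    if used.contains i || cid ≠ some sid then pvFindMatchA rest (i + 1) used sid else some tr

-- second loop of A: first index not in used_indexes
def pvFindFreeA (cs : List (Option String × String)) (i : Int) (used : List Int) : Option String :=
  match cs with
  | [] => none
  | (_, tr) :: rest =>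
    if used.contains i then pvFindFreeA rest (i + 1) used else some tr

def pop_best_effort_translation_py (candidates : List (Option String × String)) (used_indexes : List Int) (source_id : String) : String :=
  match pvFindMatchA candidates 0 used_indexes source_id with
  | some t => t
  | none =>
    match pvFindFreeA candidates 0 used_indexes with
    | some t => t
    | none => ""

-- ===== PORT B =====
-- B's single pass: carries the first unused match and the first unused candidate seen so far
def pvScanB (cs : List (Option String × String)) (i : Int) (used : List Int) (sid : String)
    (m f : Option String) : Option String × Option String :=
  match cs with
  | [] => (m, f)
  | (cid, tr) :: rest =>
    if used.contains i then pvScanB rest (i + 1) used sid m f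
    else
      pvScanB rest (i + 1) used sid
        (match m with
         | some _ => m
         | none => if cid = some sid then some tr else none)
        (match f with
         | some _ => f
         | none => some tr)

def pop_best_effort_translation_py_alt (candidates : List (Option String × String)) (used_indexes : List Int) (source_id : String) : String :=
  match pvScanB candidates 0 used_indexes source_id none none with
  | (some t, _) => t
  | (none, some t) => t
  | (none, none) => ""

-- ===== PRECONDITION & SPEC =====
def Spec_pop_best_effort_translation_py (candidates : List (Option String × String)) (used_indexes : List Int) (source_id : String) (out : String) : Prop := out = pop_best_effort_translation_py_alt candidates used_indexes source_id
instance (candidates : List (Option String × String)) (used_indexes : List Int) (source_id : String) (out : String) : Decidable (Spec_pop_best_effort_translation_py candidates used_indexes source_id out) := by unfold Spec_pop_best_effort_translation_py; infer_instance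

-- ===== CLAIM (what is proved, stated in full; the proofs are below) =====
def Claim_equal_pop_best_effort_translation_py : Prop := ∀ (candidates : List (Option String × String)) (used_indexes : List Int) (source_id : String), Dom_pop_best_effort_translation_py candidates used_indexes source_id → Spec_pop_best_effort_translation_py candidates used_indexes source_id (pop_best_effort_translation_py candidates used_indexes source_id)

-- ===== LEMMAS AND PROOFS =====
theorem pvScanB_eq (cs : List (Option String × String)) (i : Int) (used : List Int)
    (sid : String) (m f : Option String) :
    pvScanB cs i used sid m f =
      (m.or (pvFindMatchA cs i used sid), f.or (pvFindFreeA cs i used)) := by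
  induction cs generalizing i m f with
  | nil => simp [pvScanB, pvFindMatchA, pvFindFreeA]
  | cons hd rest ih =>
    obtain ⟨cid, tr⟩ := hd
    by_cases hu : i ∈ used
    · simp [pvScanB, pvFindMatchA, pvFindFreeA, hu, ih]
    · by_cases hc : cid = some sid <;>
        cases m <;> cases f <;>
          simp [pvScanB, pvFindMatchA, pvFindFreeA, hu, hc, ih]

-- ===== VERDICT (by name: the statement is the Claim_ definition above) =====
theorem pop_best_effort_translation_py_spec : Claim_equal_pop_best_effort_translation_py := by
  intro candidates used_indexes source_id _
  unfold Spec_pop_best_effort_translation_py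
  unfold pop_best_effort_translation_py pop_best_effort_translation_py_alt
  rw [pvScanB_eq]
  simp only [Option.none_or]
  cases pvFindMatchA candidates 0 used_indexes source_id <;>
    cases pvFindFreeA candidates 0 used_indexes <;> rfl
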